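-- pv_equiv track=rewrite | github.com/jfear/larval_gonad | lib/larval_gonad/io.py | compress_seq
-- ===== SOURCE A (Python) =====
-- NUCS_INVERSE = {'A': 0, 'C': 1, 'G': 2, 'T': 3}
--
-- def compress_seq(s: str):
--     """ Pack a DNA sequence (no Ns!) into a 2-bit format, in a 64-bit uint
--
--     Most significant bit is set if there was an error
--
--     Based on code from: https://github.com/10XGenomics/cellranger
--
--     cellranger/lib/python/cellranger/utils.py
--
--     """
--     bits = 64
--     assert len(s) <= (bits/2 - 1)
--     result = 0
--     for nuc in s:
--         if nuc not in NUCS_INVERSE: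
--             return 1 << (bits - 1)
--         result = result << 2
--         result = result | NUCS_INVERSE[nuc]
--     return result
-- ===== SOURCE B (Python) =====
-- NUCS_INVERSE = {'A': 0, 'C': 1, 'G': 2, 'T': 3}
--
-- def compress_seq(s: str):
--     """Pack DNA into 2-bit-per-base: validate first, then sum positional weights."""
--     bits = 64
--     assert len(s) <= (bits / 2 - 1)
--     if any(nuc not in NUCS_INVERSE for nuc in s):
--         return 1 << (bits - 1)
--     return sum(NUCS_INVERSE[nuc] << (2 * i) for i, nuc in enumerate(reversed(s)))
-- ===== Notes on version B (the rewrite author's own statement) =====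
-- stated objective: alternative
-- what changed: Replaced the single left-to-right shift-or accumulator loop with an early return by a validation pass followed by a sum of per-base values shifted by their position over the reversed sequence.
import Mathlib
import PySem

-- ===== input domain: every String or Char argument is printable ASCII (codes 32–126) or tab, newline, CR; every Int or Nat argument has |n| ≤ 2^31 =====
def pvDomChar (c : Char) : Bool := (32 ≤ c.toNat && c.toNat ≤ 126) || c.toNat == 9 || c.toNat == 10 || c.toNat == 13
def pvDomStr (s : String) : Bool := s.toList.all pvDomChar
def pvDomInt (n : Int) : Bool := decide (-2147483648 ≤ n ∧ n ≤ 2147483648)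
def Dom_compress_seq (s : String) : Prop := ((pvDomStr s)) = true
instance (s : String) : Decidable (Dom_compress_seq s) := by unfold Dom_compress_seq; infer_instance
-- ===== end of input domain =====

-- B changes the algorithm: a validation pass, then a sum of positionally shifted 2-bit codes
-- (no speed claim; return-value equivalence only).

-- ===== PORT A =====
def NUCS_INVERSE : PySem.Dict Char Int :=
  PySem.Dict.ofList [('A', 0), ('C', 1), ('G', 2), ('T', 3)]

-- A's for-loop: early return of the sentinel on an invalid base, else shift-or the code in
def compressLoopA : List Char → Int → Int
  | [], result => result
  | nuc :: rest, result =>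
    if !(NUCS_INVERSE.contains nuc) then (1 : Int) <<< 63
    else compressLoopA rest (PySem.Int.bor (result <<< 2) ((NUCS_INVERSE.get? nuc).getD 0))

def compress_seq (s : String) : Int := compressLoopA s.toList 0

-- ===== PORT B =====
-- B: if any base is invalid return the sentinel, else sum NUCS_INVERSE[nuc] << 2*i over
-- enumerate(reversed(s)); the index is nonnegative, so Lean's Int << is exact here.
def compress_seq_alt (s : String) : Int :=
  if s.toList.any (fun nuc => !(NUCS_INVERSE.contains nuc)) then (1 : Int) <<< 63
  else ((PySem.List.enumerate s.toList.reverse).map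
        (fun p => ((NUCS_INVERSE.get? p.2).getD 0) <<< (2 * p.1))).sum

-- ===== PRECONDITION & SPEC =====
-- A's assert raises AssertionError for strings longer than 31 characters; Pre_ excludes exactly those.
def Pre_compress_seq (s : String) : Prop := s.toList.length ≤ 31
instance (s : String) : Decidable (Pre_compress_seq s) := by unfold Pre_compress_seq; infer_instance
def pvWitness_compress_seq : String := "ACGT"

def Spec_compress_seq (s : String) (out : Int) : Prop := out = compress_seq_alt s
instance (s : String) (out : Int) : Decidable (Spec_compress_seq s out) := by unfold Spec_compress_seq; infer_instance

-- ===== CLAIM (what is proved, stated in full; the proofs are below) =====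
def Claim_equal_compress_seq : Prop := ∀ (s : String), Dom_compress_seq s → Pre_compress_seq s → Spec_compress_seq s (compress_seq s)

-- ===== LEMMAS AND PROOFS =====
-- numeric value of one base (Nat level), proof-only helper
def digN (c : Char) : ℕ := if c = 'A' then 0 else if c = 'C' then 1 else if c = 'G' then 2 else 3

-- the packed value of a valid sequence (Nat level), proof-only helper
def valN : List Char → ℕ
  | [] => 0
  | c :: cs => digN c * 4 ^ cs.length + valN cs

lemma contains_cases (c : Char) (h : NUCS_INVERSE.contains c = true) :
    c = 'A' ∨ c = 'C' ∨ c = 'G' ∨ c = 'T' := by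
  have hN : NUCS_INVERSE = PySem.Dict.mk [('A', 0), ('C', 1), ('G', 2), ('T', 3)] := by decide
  rw [hN] at h
  simp only [PySem.Dict.contains_mk, List.any_cons, List.any_nil, Bool.or_eq_true,
    Bool.or_false, beq_iff_eq] at h
  rcases h with h | h | h | h
  · exact Or.inl h.symm
  · exact Or.inr (Or.inl h.symm)
  · exact Or.inr (Or.inr (Or.inl h.symm))
  · exact Or.inr (Or.inr (Or.inr h.symm))

lemma dig_eq (c : Char) (h : NUCS_INVERSE.contains c = true) :
    (NUCS_INVERSE.get? c).getD 0 = ((digN c : ℕ) : Int) ∧ digN c < 4 := by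
  rcases contains_cases c h with rfl | rfl | rfl | rfl <;> simp [digN] <;> decide

lemma shift_or_nat (r v : ℕ) (hv : v < 4) : r <<< 2 ||| v = 4 * r + v := by
  have h1 : r <<< 2 = Nat.bit false (Nat.bit false r) := by
    simp [Nat.shiftLeft_eq, Nat.bit]; ring
  interval_cases v
  · simp [h1, Nat.bit]; ring
  · have h2 : (1 : ℕ) = Nat.bit true 0 := rfl
    rw [h1, h2, Nat.lor_bit]; simp [Nat.bit]; ring
  · have h2 : (2 : ℕ) = Nat.bit false (Nat.bit true 0) := rfl
    rw [h1, h2, Nat.lor_bit, Nat.lor_bit]; simp [Nat.bit]; ring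
  · have h2 : (3 : ℕ) = Nat.bit true (Nat.bit true 0) := rfl
    rw [h1, h2, Nat.lor_bit, Nat.lor_bit]; simp [Nat.bit]; ring

lemma shift_or_int (m v : ℕ) (hv : v < 4) :
    PySem.Int.bor (((m : ℕ) : Int) <<< (2 : Int)) ((v : ℕ) : Int) = (((4 * m + v : ℕ) : ℕ) : Int) := by
  have h1 : ((m : ℕ) : Int) <<< (2 : Int) = (((m <<< 2 : ℕ) : ℕ) : Int) := by
    have h2 : (2 : Int) = ((2 : ℕ) : Int) := rfl
    rw [h2, Int.shiftLeft_natCast]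
  rw [h1, PySem.Int.bor_natCast, shift_or_nat m v hv]

lemma loopA_invalid (cs : List Char) (r : Int)
    (h : cs.any (fun c => !(NUCS_INVERSE.contains c)) = true) :
    compressLoopA cs r = (1 : Int) <<< 63 := by
  induction cs generalizing r with
  | nil => simp at h
  | cons c cs ih =>
    by_cases hc : NUCS_INVERSE.contains c = true
    · simp only [List.any_cons, hc, Bool.not_true, Bool.false_or] at h
      simp [compressLoopA, hc, ih _ h]
    · simp [compressLoopA, hc]

lemma loopA_valid (cs : List Char) (m : ℕ)
    (h : ∀ c ∈ cs, NUCS_INVERSE.contains c = true) :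
    compressLoopA cs ((m : ℕ) : Int) = ((m * 4 ^ cs.length + valN cs : ℕ) : Int) := by
  induction cs generalizing m with
  | nil => simp [compressLoopA, valN]
  | cons c cs ih =>
    have hc := h c (by simp)
    obtain ⟨hd, hv⟩ := dig_eq c hc
    have hrest : ∀ x ∈ cs, NUCS_INVERSE.contains x = true := fun x hx => h x (by simp [hx])
    simp only [compressLoopA, hc, Bool.not_true, Bool.false_eq_true, reduceIte]
    rw [hd, shift_or_int m (digN c) hv, ih _ hrest]
    congr 1
    simp [valN, List.length_cons]
    ring

lemma sum_shift (l : List Char) (k : ℕ)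
    (h : ∀ c ∈ l, NUCS_INVERSE.contains c = true) :
    ((PySem.List.enumerate l ((k : ℕ) : Int)).map
        (fun p => ((NUCS_INVERSE.get? p.2).getD 0) <<< (2 * p.1))).sum
      = (4 : Int) ^ k * ((valN l.reverse : ℕ) : Int) := by
  induction l generalizing k with
  | nil => simp [PySem.List.enumerate, valN]
  | cons c l ih =>
    have hc := h c (by simp)
    obtain ⟨hd, _⟩ := dig_eq c hc
    have hrest : ∀ x ∈ l, NUCS_INVERSE.contains x = true := fun x hx => h x (by simp [hx])
    have hstep : ((k : ℕ) : Int) + 1 = (((k + 1 : ℕ) : ℕ) : Int) := by push_cast; ring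
    have hval : valN (l.reverse ++ [c]) = 4 * valN l.reverse + digN c := by
      clear ih hstep hd
      induction l.reverse with
      | nil => simp [valN]
      | cons x xs ihx => simp [valN, ihx]; ring
    simp only [PySem.List.enumerate, List.map_cons, List.sum_cons, hstep, ih _ hrest,
      List.reverse_cons, hval, hd]
    have htn : 2 * ((k : ℕ) : Int) = ((2 * k : ℕ) : Int) := by push_cast; ring
    have hsh : ((digN c : ℕ) : Int) <<< ((2 * k : ℕ) : Int) = (((digN c <<< (2 * k) : ℕ) : ℕ) : Int) :=
      Int.shiftLeft_natCast _ _
    rw [htn, hsh, Nat.shiftLeft_eq]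
    push_cast
    have h4 : ((2 : Int)) ^ (k * 2) = 4 ^ k := by rw [mul_comm k 2, pow_mul]; norm_num
    rw [mul_comm 2 k, h4]
    ring

-- ===== VERDICT (by name: the statement is the Claim_ definition above) =====
theorem compress_seq_spec : Claim_equal_compress_seq := by
  intro s _ _
  unfold Spec_compress_seq compress_seq compress_seq_alt
  by_cases h : s.toList.any (fun c => !(NUCS_INVERSE.contains c)) = true
  · rw [loopA_invalid _ _ h, if_pos h]
  · rw [if_neg h]
    have hall : ∀ c ∈ s.toList, NUCS_INVERSE.contains c = true := by
      intro c hcsub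
      by_contra hc
      exact h (List.any_eq_true.mpr ⟨c, hcsub, by simp [hc]⟩)
    have hallrev : ∀ c ∈ s.toList.reverse, NUCS_INVERSE.contains c = true := by
      intro c hcsub; exact hall c (List.mem_reverse.mp hcsub)
    have h0 : (0 : Int) = (((0 : ℕ) : ℕ) : Int) := rfl
    rw [h0, loopA_valid _ _ hall]
    have := sum_shift s.toList.reverse 0 hallrev
    simp only [Nat.cast_zero] at this ⊢
    rw [this]
    simp
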